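-- pv_equiv track=rewrite | github.com/endomorphosis/ipfs_datasets_py | tests/unit/optimizers/test_batch_321_ontology_generator_doctests.py | extract_doctest_examples
-- ===== SOURCE A (Python) =====
-- from typing import Dict, Set, List, Tuple
--
-- def extract_doctest_examples(docstring: str) -> List[str]:
--     """
--     Extract all doctest examples (lines starting with >>>) from a docstring.
--     """
--     lines = docstring.split("\n")
--     examples = []
--     current_example = []
--
--     in_code_block = False
--     for line in lines:
--         if ">>>" in line:
--             in_code_block = True
--             current_example.append(line)
--         elif in_code_block and (line.startswith("...") or line.startswith(">>>")):
--             current_example.append(line)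
--         elif in_code_block and line.strip() == "":
--             if current_example:
--                 examples.append("\n".join(current_example))
--                 current_example = []
--             in_code_block = False
--         elif in_code_block and not line.startswith(" "):
--             if current_example:
--                 examples.append("\n".join(current_example))
--                 current_example = []
--             in_code_block = False
--         elif in_code_block:
--             current_example.append(line)
--
--     if current_example:
--         examples.append("\n".join(current_example))
--
--     return examples
-- ===== SOURCE B (Python) =====
-- def extract_doctest_examples(docstring: str) -> list:
--     lines = docstring.split("\n")
--     examples = []
--     i, n = 0, len(lines)
--     while i < n:
--         if ">>>" not in lines[i]:
--             i += 1
--             continue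
--         j = i + 1
--         while j < n and (">>>" in lines[j]
--                          or lines[j].startswith("...")
--                          or (lines[j].startswith(" ") and lines[j].strip() != "")):
--             j += 1
--         examples.append("\n".join(lines[i:j]))
--         i = j
--     return examples
-- ===== Notes on version B (the rewrite author's own statement) =====
-- stated objective: alternative
-- what changed: Replaces A's single pass with an in_code_block flag and mutable accumulator by a nested scan: an outer loop looks for a line that opens an example block, an inner loop consumes that block's continuation lines, and each block is emitted as one contiguous slice of the line list.
import Mathlib
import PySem

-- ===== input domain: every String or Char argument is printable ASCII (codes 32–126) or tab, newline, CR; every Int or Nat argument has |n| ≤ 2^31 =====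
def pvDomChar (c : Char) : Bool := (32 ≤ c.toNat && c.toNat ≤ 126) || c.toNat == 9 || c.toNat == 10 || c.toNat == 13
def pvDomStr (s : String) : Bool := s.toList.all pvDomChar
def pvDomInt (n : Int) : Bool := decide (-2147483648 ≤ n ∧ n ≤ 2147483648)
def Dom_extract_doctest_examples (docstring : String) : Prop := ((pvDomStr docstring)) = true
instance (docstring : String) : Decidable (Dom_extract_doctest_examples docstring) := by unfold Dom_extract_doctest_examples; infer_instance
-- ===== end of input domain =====

-- B replaces A's single pass with a boolean flag by a nested scan (outer: find a '>>>' line;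
-- inner: consume continuation lines); objective: alternative decomposition, same cost.

-- ===== PORT A =====
-- one iteration of A's for-loop over (examples, current_example, in_code_block)
def pvStepA (st : List String × List String × Bool) (line : String) :
    List String × List String × Bool :=
  let examples := st.1
  let current := st.2.1
  let inb := st.2.2
  if PySem.Str.isIn ">>>" line then
    (examples, current ++ [line], true)
  else if inb && (PySem.Str.startswith line "..." || PySem.Str.startswith line ">>>") then
    (examples, current ++ [line], inb)
  else if inb && (PySem.Str.strip line == "") then
    ((if current = [] then examples else examples ++ [PySem.Str.join "\n" current]), [], false)
  else if inb && !PySem.Str.startswith line " " then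
    ((if current = [] then examples else examples ++ [PySem.Str.join "\n" current]), [], false)
  else if inb then
    (examples, current ++ [line], inb)
  else st

def extract_doctest_examples (docstring : String) : List String :=
  let lines := (PySem.Str.split? docstring "\n").getD []
  let st := lines.foldl pvStepA ([], [], false)
  if st.2.1 = [] then st.1 else st.1 ++ [PySem.Str.join "\n" st.2.1]

-- ===== PORT B =====
-- the inner while-loop's continuation test of Source B
def pvCont (line : String) : Bool :=
  PySem.Str.isIn ">>>" line || PySem.Str.startswith line "..."
    || (PySem.Str.startswith line " " && !(PySem.Str.strip line == ""))

-- the inner while-loop: split off the continuation lines of the open block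
def pvTake : List String → List String × List String
  | [] => ([], [])
  | l :: rest =>
    if pvCont l then (l :: (pvTake rest).1, (pvTake rest).2)
    else ([], l :: rest)

theorem pvTake_snd_length_le : ∀ (ls : List String), (pvTake ls).2.length ≤ ls.length := by
  intro ls
  induction ls with
  | nil => simp [pvTake]
  | cons l rest ih =>
    simp only [pvTake]
    split
    · simpa using Nat.le_succ_of_le ih
    · simp

-- the outer while-loop of Source B
def pvOuter : List String → List String
  | [] => []
  | l :: rest =>
    if PySem.Str.isIn ">>>" l then
      PySem.Str.join "\n" (l :: (pvTake rest).1) :: pvOuter (pvTake rest).2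
    else pvOuter rest
termination_by ls => ls.length
decreasing_by
  · exact Nat.lt_succ_of_le (pvTake_snd_length_le rest)
  · simp

def extract_doctest_examples_alt (docstring : String) : List String :=
  pvOuter ((PySem.Str.split? docstring "\n").getD [])

-- ===== PRECONDITION & SPEC =====
def Spec_extract_doctest_examples (docstring : String) (out : List String) : Prop := out = extract_doctest_examples_alt docstring
instance (docstring : String) (out : List String) : Decidable (Spec_extract_doctest_examples docstring out) := by unfold Spec_extract_doctest_examples; infer_instance

-- ===== CLAIM (what is proved, stated in full; the proofs are below) =====
def Claim_equal_extract_doctest_examples : Prop := ∀ (docstring : String), Dom_extract_doctest_examples docstring → Spec_extract_doctest_examples docstring (extract_doctest_examples docstring)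

-- ===== LEMMAS AND PROOFS =====

-- A's final flush, parametrised by the fold state
def pvFinish (st : List String × List String × Bool) : List String :=
  if st.2.1 = [] then st.1 else st.1 ++ [PySem.Str.join "\n" st.2.1]

theorem pvStepA_false (acc : List String) (l : String) :
    pvStepA (acc, [], false) l =
      if PySem.Str.isIn ">>>" l then (acc, [l], true) else (acc, [], false) := by
  simp [pvStepA]

theorem pvStepA_true (acc cur : List String) (l : String) :
    pvStepA (acc, cur, true) l =
      if pvCont l then (acc, cur ++ [l], true)
      else ((if cur = [] then acc else acc ++ [PySem.Str.join "\n" cur]), [], false) := by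
  by_cases h1 : PySem.Chars.isIn ['>', '>', '>'] l.toList = true
  · simp [pvStepA, pvCont, h1]
  · by_cases h2 : PySem.Chars.startswith l.toList ['.', '.', '.'] = true
    · simp [pvStepA, pvCont, h1, h2]
    · have h3 : PySem.Chars.startswith l.toList ['>', '>', '>'] = false := by
        by_contra hc
        have hc' : PySem.Chars.startswith l.toList ['>', '>', '>'] = true := by
          cases hcase : PySem.Chars.startswith l.toList ['>', '>', '>'] <;> simp_all
        have hpre : ['>', '>', '>'] <+: l.toList :=
          (PySem.Chars.startswith_iff l.toList ['>', '>', '>']).mp hc'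
        exact h1 ((PySem.Chars.isIn_iff_infix _ _).mpr hpre.isInfix)
      by_cases h4 : PySem.Str.strip l = ""
      · simp [pvStepA, pvCont, h1, h2, h3, h4]
      · by_cases h5 : PySem.Chars.startswith l.toList [' '] = true
        · simp [pvStepA, pvCont, h1, h2, h3, h4, h5]
        · simp [pvStepA, pvCont, h1, h2, h3, h4, h5]

theorem pvCont_no_gtgt (l : String) (h : pvCont l = false) :
    PySem.Chars.isIn ['>', '>', '>'] l.toList = false := by
  simp [pvCont] at h
  exact h.1.1

theorem pvMain : ∀ (lines : List String),
    (∀ acc : List String,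
      pvFinish (lines.foldl pvStepA (acc, [], false)) = acc ++ pvOuter lines) ∧
    (∀ (acc cur : List String), cur ≠ [] →
      pvFinish (lines.foldl pvStepA (acc, cur, true))
        = acc ++ [PySem.Str.join "\n" (cur ++ (pvTake lines).1)]
          ++ pvOuter (pvTake lines).2) := by
  intro lines
  induction lines with
  | nil =>
    constructor
    · intro acc; simp [pvFinish, pvOuter]
    · intro acc cur hcur; simp [pvFinish, pvTake, pvOuter, hcur]
  | cons l rest ih =>
    obtain ⟨ih1, ih2⟩ := ih
    constructor
    · intro acc
      rw [List.foldl_cons, pvStepA_false]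
      by_cases h : PySem.Str.isIn ">>>" l = true
      · rw [if_pos h]
        rw [ih2 acc [l] (by simp)]
        rw [pvOuter, if_pos h]
        simp
      · rw [if_neg h, ih1 acc]
        rw [pvOuter, if_neg h]
    · intro acc cur hcur
      rw [List.foldl_cons, pvStepA_true]
      by_cases h : pvCont l = true
      · rw [if_pos h]
        rw [ih2 acc (cur ++ [l]) (by simp)]
        simp only [pvTake, h, if_pos]
        simp
      · rw [if_neg h, if_neg hcur, ih1]
        have hg := pvCont_no_gtgt l (by cases hc : pvCont l <;> simp_all)
        simp only [pvTake, h, Bool.false_eq_true, if_false]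
        rw [pvOuter, if_neg (by simp [hg])]
        simp

-- ===== VERDICT (by name: the statement is the Claim_ definition above) =====
theorem extract_doctest_examples_spec : Claim_equal_extract_doctest_examples := by
  intro docstring _
  unfold Spec_extract_doctest_examples extract_doctest_examples extract_doctest_examples_alt
  have h := (pvMain ((PySem.Str.split? docstring "\n").getD [])).1 []
  simpa [pvFinish] using h
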